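-- pv_equiv track=rewrite | github.com/daniel-reich/turbo-robot | vCRP3WXbJ9erKFsiK_5.py | dif_ciph1
-- ===== SOURCE A (Python) =====
-- def dif_ciph1(inpt):
--     x,res,y,=[],'',[]
--     for i in inpt:
--         if i==' ':
--             x.append(ord(i))
--         else:
--             x.append(ord(i))
--     a=x[0]
--     x=x[::-1]
--     for i in range(len(x)-1):
--         y.append(x[i]-x[i+1])
--     y=y+[a]
--     return y[::-1]
-- ===== SOURCE B (Python) =====
-- def dif_ciph1(inpt):
--     out = []
--     prev = 0
--     for c in inpt:
--         o = ord(c)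
--         out.append(o - prev)
--         prev = o
--     return out
-- ===== Notes on version B (the rewrite author's own statement) =====
-- stated objective: simpler
-- what changed: Replaces A's staged pipeline (build ordinal list, reverse it, loop over indexed pairs of the reversed list, append the saved first ordinal, reverse again) with one streaming fold over the characters carrying only the previous ordinal (delta encoding with prev initialized to 0), no intermediate lists, no indexing, no reversals.
import Mathlib
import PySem

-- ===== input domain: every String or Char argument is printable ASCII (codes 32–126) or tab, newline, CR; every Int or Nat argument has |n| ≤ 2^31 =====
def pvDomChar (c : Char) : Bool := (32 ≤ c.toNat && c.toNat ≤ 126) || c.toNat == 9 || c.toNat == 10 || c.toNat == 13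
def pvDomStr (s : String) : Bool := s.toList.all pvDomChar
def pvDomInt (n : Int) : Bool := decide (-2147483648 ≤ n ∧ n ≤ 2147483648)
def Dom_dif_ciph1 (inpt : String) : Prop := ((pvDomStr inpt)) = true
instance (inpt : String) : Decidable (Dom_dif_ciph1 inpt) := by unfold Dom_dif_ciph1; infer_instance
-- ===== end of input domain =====

-- B replaces A's build-reverse-pair-append-reverse pipeline with one streaming fold
-- carrying the previous ordinal (delta encoding): simpler. On "" A raises, B returns [].


-- ===== PORT A =====
def dif_ciph1 (inpt : String) : List Int :=
  let x : List Int := inpt.toList.foldl (fun acc i =>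
    if i = ' ' then acc ++ [(i.toNat : Int)] else acc ++ [(i.toNat : Int)]) []
  let a : Int := PySem.List.pyGetD x 0 0
  let x : List Int := (PySem.List.slice? x none none (-1)).getD []
  let y : List Int := (PySem.List.pyRange 0 ((x.length : Int) - 1) 1).foldl
    (fun acc i => acc ++ [PySem.List.pyGetD x i 0 - PySem.List.pyGetD x (i + 1) 0]) []
  let y : List Int := y ++ [a]
  (PySem.List.slice? y none none (-1)).getD []

-- ===== PORT B =====
def dif_ciph1_alt (inpt : String) : List Int :=
  (inpt.toList.foldl
    (fun (st : List Int × Int) c => (st.1 ++ [((c.toNat : Int) - st.2)], (c.toNat : Int)))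
    ([], 0)).1

-- ===== PRECONDITION & SPEC =====
-- A evaluates x[0] on the empty string and raises IndexError; Pre_ excludes exactly the empty string.
def Pre_dif_ciph1 (inpt : String) : Prop := inpt.toList ≠ []
instance (inpt : String) : Decidable (Pre_dif_ciph1 inpt) := by unfold Pre_dif_ciph1; infer_instance
def pvWitness_dif_ciph1 : String := ("cab")
def Spec_dif_ciph1 (inpt : String) (out : List Int) : Prop := out = dif_ciph1_alt inpt
instance (inpt : String) (out : List Int) : Decidable (Spec_dif_ciph1 inpt out) := by unfold Spec_dif_ciph1; infer_instance

-- ===== CLAIM (what is proved, stated in full; the proofs are below) =====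
def Claim_equal_dif_ciph1 : Prop := ∀ (inpt : String), Dom_dif_ciph1 inpt → Pre_dif_ciph1 inpt → Spec_dif_ciph1 inpt (dif_ciph1 inpt)

-- ===== LEMMAS AND PROOFS =====

-- Delta encoding: the common normal form both proofs reduce to.
def pvDeltas (prev : Int) : List Int → List Int
  | [] => []
  | a :: t => (a - prev) :: pvDeltas a t

lemma pvDeltas_length (prev : Int) (l : List Int) : (pvDeltas prev l).length = l.length := by
  induction l generalizing prev with
  | nil => rfl
  | cons a t ih => simp [pvDeltas, ih]

lemma pvDeltas_getElem (prev : Int) (l : List Int) (k : ℕ) (h : k < l.length)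
    (h' : k < (pvDeltas prev l).length) :
    (pvDeltas prev l)[k] = l[k] - (if k = 0 then prev else l[k-1]'(by omega)) := by
  induction l generalizing prev k with
  | nil => simp at h
  | cons a t ih =>
    cases k with
    | zero => simp [pvDeltas]
    | succ n =>
      have ht : n < t.length := by simpa using h
      simp only [pvDeltas, List.getElem_cons_succ]
      rw [ih a n ht (by simpa [pvDeltas_length] using ht)]
      cases n with
      | zero => simp
      | succ m => simp

-- B's fold computes acc ++ deltas.
lemma foldB_eq_deltas (chars : List Char) (acc : List Int) (prev : Int) :
    (chars.foldl
      (fun (st : List Int × Int) c => (st.1 ++ [((c.toNat : Int) - st.2)], (c.toNat : Int)))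
      (acc, prev)).1 = acc ++ pvDeltas prev (chars.map (fun c => (c.toNat : Int))) := by
  induction chars generalizing acc prev with
  | nil => simp [pvDeltas]
  | cons c t ih => simp [List.foldl_cons, ih, pvDeltas]

-- A's reversed-pairs-then-reverse pipeline, normalized to forward indexed form.
lemma rev_diffs_eq_forward (l : List Int) (hl : l ≠ []) :
    ((PySem.List.pyRange 0 ((l.reverse.length : Int) - 1) 1).map
        (fun i => PySem.List.pyGetD l.reverse i 0 - PySem.List.pyGetD l.reverse (i + 1) 0)
      ++ [PySem.List.pyGetD l 0 0]).reverse
    = [PySem.List.pyGetD l 0 0] ++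
        (PySem.List.pyRange 1 (l.length : Int) 1).map
          (fun i => PySem.List.pyGetD l i 0 - PySem.List.pyGetD l (i - 1) 0) := by
  have hn : 1 ≤ l.length := List.length_pos_iff.mpr hl
  rw [List.reverse_append]
  simp only [List.reverse_cons, List.reverse_nil, List.nil_append, List.length_reverse,
    List.singleton_append, List.cons.injEq, true_and]
  apply List.ext_getElem
  · simp [PySem.List.length_pyRange_one]
  · intro k h1 h2
    simp only [List.length_map, PySem.List.length_pyRange_one, List.length_reverse] at h1 h2
    simp only [List.getElem_reverse, List.getElem_map, PySem.List.getElem_pyRange_one,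
      List.length_map, PySem.List.length_pyRange_one]
    rw [PySem.List.pyGetD_eq_getElem _ _ (by omega) (by simp; omega),
        PySem.List.pyGetD_eq_getElem _ _ (by omega) (by simp; omega),
        PySem.List.pyGetD_eq_getElem _ _ (by omega) (by omega),
        PySem.List.pyGetD_eq_getElem _ _ (by omega) (by omega)]
    simp only [List.getElem_reverse]
    congr 1 <;> congr 1 <;> omega

-- The forward indexed form is the delta encoding with prev = 0.
lemma forward_eq_deltas (l : List Int) (hl : l ≠ []) :
    [PySem.List.pyGetD l 0 0] ++
      (PySem.List.pyRange 1 (l.length : Int) 1).map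
        (fun i => PySem.List.pyGetD l i 0 - PySem.List.pyGetD l (i - 1) 0)
    = pvDeltas 0 l := by
  have hn : 1 ≤ l.length := List.length_pos_iff.mpr hl
  apply List.ext_getElem
  · simp [pvDeltas_length, PySem.List.length_pyRange_one]; omega
  · intro k h1 h2
    have hk : k < l.length := by simpa [pvDeltas_length] using h2
    rw [pvDeltas_getElem 0 l k hk h2]
    cases k with
    | zero =>
      simp only [List.singleton_append, List.getElem_cons_zero]
      rw [PySem.List.pyGetD_eq_getElem _ _ (by omega) (by omega)]
      simp
    | succ n =>
      simp only [List.singleton_append, List.getElem_cons_succ, List.getElem_map,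
        PySem.List.getElem_pyRange_one]
      rw [PySem.List.pyGetD_eq_getElem _ _ (by omega) (by omega),
          PySem.List.pyGetD_eq_getElem _ _ (by omega) (by omega)]
      rw [if_neg (Nat.succ_ne_zero n)]
      congr 2 <;> omega

theorem dif_ciph1_spec : Claim_equal_dif_ciph1 := by
  intro inpt _ hpre
  unfold Spec_dif_ciph1 dif_ciph1 dif_ciph1_alt
  have hl : inpt.toList.map (fun c => ((c.toNat : Int))) ≠ [] := by
    simpa [Pre_dif_ciph1] using hpre
  rw [foldB_eq_deltas]
  simp only [ite_self, PySem.List.foldl_append_singleton_eq_map,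
    PySem.List.slice?_none_none_neg_one, Option.getD_some, List.nil_append]
  rw [rev_diffs_eq_forward _ hl, forward_eq_deltas _ hl]
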